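-- pv_equiv track=rewrite | github.com/numbbo/coco-postprocess | src/cocopp/config.py | _index_after_parameter
-- ===== SOURCE A (Python) =====
-- def _index_after_parameter(name, return_first_digit_index=False):
--     """return the first index after a sequence indicating a positive float.
--
--     In particular, `1.23` or `1.2e-3` are correctly identified as a float.
--
--     If `return_first_digit_index`, the index of the first digit is returned
--     instead of the first index after the float.
--     """
--     found = False
--     exponent = False
--     accept_minus = False  # allow to read a minus in the exponent
--     for i in range(len(name)):
--         if '0' <= name[i] <= '9' or (
--                 name[i] == '.' and not exponent) or (
--                 accept_minus and name[i] == '-'):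
--             found = True
--             if return_first_digit_index:
--                 return i
--             accept_minus = False  # accept only once directly after 'e'
--             continue
--         elif found and not exponent and name[i].lower() == 'e':
--             exponent = True
--             accept_minus = True
--             continue
--         elif found:
--             return i if name[i-1].lower() != 'e' else i - 1
--     return -1
-- ===== SOURCE B (Python) =====
-- def _index_after_parameter(name, return_first_digit_index=False):
--     """Phased scan: find the float's start, consume the mantissa, then an
--     optional exponent part, instead of a flag-driven state machine."""
--     n = len(name)
--     s = next((i for i in range(n) if name[i].isdigit() or name[i] == '.'), -1)
--     if s == -1:
--         return -1
--     if return_first_digit_index: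
--         return s
--     j = s
--     while j < n and (name[j].isdigit() or name[j] == '.'):
--         j += 1
--     if j == n:
--         return -1
--     if name[j] not in 'eE':
--         return j
--     k = j + 1 + (j + 1 < n and name[j + 1] == '-')
--     while k < n and name[k].isdigit():
--         k += 1
--     if k == n:
--         return -1
--     return j if k == j + 1 else k
-- ===== Notes on version B (the rewrite author's own statement) =====
-- stated objective: simpler
-- what changed: A's single flag-driven state machine (found/exponent/accept_minus booleans updated per character) is replaced by a phased scan: find the first digit-or-dot index, consume the mantissa with one while loop, then handle an optional exponent part ('e'/'E', optional '-', digits) directly.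
import Mathlib
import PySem

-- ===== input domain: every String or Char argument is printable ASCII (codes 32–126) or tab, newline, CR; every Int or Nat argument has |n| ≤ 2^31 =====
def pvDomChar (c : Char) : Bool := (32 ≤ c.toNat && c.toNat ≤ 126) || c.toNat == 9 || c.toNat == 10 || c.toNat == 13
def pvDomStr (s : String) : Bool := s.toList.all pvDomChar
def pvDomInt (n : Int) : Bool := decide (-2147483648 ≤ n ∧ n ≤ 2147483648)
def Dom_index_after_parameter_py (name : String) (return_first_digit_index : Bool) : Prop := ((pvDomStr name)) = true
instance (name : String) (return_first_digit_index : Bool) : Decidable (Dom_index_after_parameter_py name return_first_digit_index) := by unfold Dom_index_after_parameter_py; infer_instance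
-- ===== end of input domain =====

-- B replaces A's flag-driven single-pass state machine by a phased scan (find the start,
-- consume the mantissa, then an optional exponent part); same return value, objective: simpler.

-- ===== PORT A =====
-- A's for-loop over indices, carrying A's three flags; `prev` carries name[i-1]
-- (A only reads name[i-1] when found is true, i.e. when i ≥ 1);
-- PySem.Chars.lowerChar is Python's str.lower on one char (exact on the ASCII domain).
def aGo (l : List Char) (i : Nat) (prev : Option Char)
    (found exponent accept_minus rfdi : Bool) : Int :=
  match l with
  | [] => -1
  | c :: rest =>
    if ('0' ≤ c && c ≤ '9') || (c == '.' && !exponent) || (accept_minus && c == '-') then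
      if rfdi then (i : Int)
      else aGo rest (i+1) (some c) true exponent false rfdi
    else if found && !exponent && (PySem.Chars.lowerChar c == 'e') then
      aGo rest (i+1) (some c) found true true rfdi
    else if found then
      (if prev.map PySem.Chars.lowerChar ≠ some 'e' then (i : Int) else (i : Int) - 1)
    else aGo rest (i+1) (some c) found exponent accept_minus rfdi

def index_after_parameter_py (name : String) (return_first_digit_index : Bool) : Int :=
  aGo name.toList 0 none false false false return_first_digit_index

-- ===== PORT B =====
-- `name[i].isdigit() or name[i] == '.'` (PySem.Chars.isdigit = Python str.isdigit on ASCII)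
def isDD (c : Char) : Bool := PySem.Chars.isdigit c || c == '.'

-- the `next(i for i in range(n) if …)` search: first index holding a digit or '.'
def bStart : List Char → Nat → Option (Nat × List Char)
  | [], _ => none
  | c :: r, i => if isDD c then some (i, c :: r) else bStart r (i+1)

-- the `while j < n and (name[j].isdigit() or name[j] == '.')` loop
def scanDD : List Char → Nat → Nat × List Char
  | [], j => (j, [])
  | c :: r, j => if isDD c then scanDD r (j+1) else (j, c :: r)

-- the `while k < n and name[k].isdigit()` loop
def scanD : List Char → Nat → Nat × List Char
  | [], k => (k, [])
  | c :: r, k => if PySem.Chars.isdigit c then scanD r (k+1) else (k, c :: r)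

-- the exponent part: optional '-' right after the 'e'/'E' (which sits at index j), then digits
def bAfterExp (j : Nat) (r : List Char) : Int :=
  let st : Nat × List Char := match r with
    | c :: r' => if c == '-' then (j+2, r') else (j+1, c :: r')
    | [] => (j+1, [])
  let kr := scanD st.2 st.1
  match kr.2 with
  | [] => -1
  | _ :: _ => if kr.1 = j+1 then (j : Int) else (kr.1 : Int)

def index_after_parameter_py_alt (name : String) (return_first_digit_index : Bool) : Int :=
  match bStart name.toList 0 with
  | none => -1
  | some (s, suf) =>
    if return_first_digit_index then (s : Int)
    else
      let jr := scanDD suf s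
      match jr.2 with
      | [] => -1
      | c :: r => if c == 'e' || c == 'E' then bAfterExp jr.1 r else (jr.1 : Int)

-- ===== PRECONDITION & SPEC =====
def Spec_index_after_parameter_py (name : String) (return_first_digit_index : Bool) (out : Int) : Prop := out = index_after_parameter_py_alt name return_first_digit_index
instance (name : String) (return_first_digit_index : Bool) (out : Int) : Decidable (Spec_index_after_parameter_py name return_first_digit_index out) := by unfold Spec_index_after_parameter_py; infer_instance

-- ===== CLAIM (what is proved, stated in full; the proofs are below) =====
def Claim_equal_index_after_parameter_py : Prop := ∀ (name : String) (return_first_digit_index : Bool), Dom_index_after_parameter_py name return_first_digit_index → Spec_index_after_parameter_py name return_first_digit_index (index_after_parameter_py name return_first_digit_index)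

-- ===== LEMMAS AND PROOFS =====

-- character-class facts
theorem char_toNat_ofNat {n : Nat} (h : n < 55296) : (Char.ofNat n).toNat = n := by
  simp only [Char.ofNat]
  split
  · simp [Char.ofNatAux, Char.toNat]
  · next hv => exact absurd (Or.inl h) hv

theorem char_beq_toNat (a b : Char) : (a == b) = decide (a.toNat = b.toNat) := by
  by_cases hab : a = b
  · subst hab; simp
  · have : a.toNat ≠ b.toNat := fun h => hab (Char.ext (UInt32.toNat_inj.mp h))
    simp [hab, this]

theorem lower_e_iff (c : Char) : (PySem.Chars.lowerChar c == 'e') = (c == 'e' || c == 'E') := by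
  unfold PySem.Chars.lowerChar PySem.Chars.isupper
  split
  · next h =>
    simp only [Bool.and_eq_true, decide_eq_true_eq, Char.le_def, UInt32.le_iff_toNat_le] at h
    have e1 : 'A'.val.toNat = 65 := rfl
    have e2 : 'Z'.val.toNat = 90 := rfl
    have e3 : c.toNat = c.val.toNat := rfl
    rw [char_beq_toNat, char_beq_toNat, char_beq_toNat, char_toNat_ofNat (by omega)]
    rw [show ('e'.toNat) = 101 from rfl, show ('E'.toNat) = 69 from rfl]
    by_cases h69 : c.toNat = 69
    · simp [h69]
    · have h101 : c.toNat ≠ 101 := by omega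
      have hsum : c.toNat + 32 ≠ 101 := by omega
      simp [h69, h101, hsum]
  · next h =>
    have hE : (c == 'E') = false := by
      refine beq_eq_false_iff_ne.mpr ?_
      rintro rfl; exact h (by decide)
    simp [hE]

theorem digit_eq_isdigit (c : Char) : (('0' ≤ c && c ≤ '9') : Bool) = PySem.Chars.isdigit c := by
  simp [PySem.Chars.isdigit]

theorem isDD_lower_ne_e {c : Char} (h : isDD c = true) : PySem.Chars.lowerChar c ≠ 'e' := by
  have hn : c.toNat ≤ 57 := by
    simp only [isDD, Bool.or_eq_true, beq_iff_eq, PySem.Chars.isdigit, Bool.and_eq_true,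
      decide_eq_true_eq, Char.le_def, UInt32.le_iff_toNat_le] at h
    rcases h with ⟨_, h2⟩ | rfl
    · exact h2
    · decide
  unfold PySem.Chars.lowerChar PySem.Chars.isupper
  rw [if_neg]
  · intro hc; subst hc; simp at hn
  · simp only [Bool.and_eq_true, decide_eq_true_eq, Char.le_def, UInt32.le_iff_toNat_le, not_and]
    intro h65; exfalso; revert h65; simp; omega

theorem minus_lower_ne_e : PySem.Chars.lowerChar '-' ≠ 'e' := by decide

-- the mantissa-and-beyond part of B, as a function of (start index, suffix at that index)
def bTail (s : Nat) (suf : List Char) : Int :=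
  let jr := scanDD suf s
  match jr.2 with
  | [] => -1
  | c :: r => if c == 'e' || c == 'E' then bAfterExp jr.1 r else (jr.1 : Int)

theorem scanD_ge (l : List Char) (m : Nat) : m ≤ (scanD l m).1 := by
  induction l generalizing m with
  | nil => simp [scanD]
  | cons c r ih =>
    unfold scanD
    split
    · exact le_trans (Nat.le_succ m) (ih (m+1))
    · simp

-- exponent phase after the first exponent char (a digit or the '-') was consumed
theorem expTail (l : List Char) (m : Nat) (prev : Char)
    (hp : PySem.Chars.lowerChar prev ≠ 'e') :
    aGo l m (some prev) true true false false =
      (match (scanD l m).2 with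
       | [] => -1
       | _ :: _ => ((scanD l m).1 : Int)) := by
  induction l generalizing m prev with
  | nil => simp [aGo, scanD]
  | cons c r ih =>
    by_cases hd : PySem.Chars.isdigit c = true
    · have h1 : aGo (c :: r) m (some prev) true true false false
          = aGo r (m+1) (some c) true true false false := by
        simp only [aGo]
        rw [if_pos (by simp [digit_eq_isdigit, hd])]
        simp
      have h2 : scanD (c :: r) m = scanD r (m+1) := by simp [scanD, hd]
      rw [h1, h2]
      exact ih (m+1) c (isDD_lower_ne_e (by simp [isDD, hd]))
    · have h1 : aGo (c :: r) m (some prev) true true false false = (m : Int) := by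
        simp only [aGo]
        rw [if_neg (by simp [digit_eq_isdigit, hd]), if_neg (by simp), if_pos (by simp),
          if_pos (by simp [hp])]
      have h2 : scanD (c :: r) m = (m, c :: r) := by simp [scanD, hd]
      rw [h1, h2]

-- exponent phase right after consuming the 'e'/'E' at index j (so i = j+1, prev is that char)
theorem expPhase (l : List Char) (j : Nat) (pe : Char)
    (hpe : PySem.Chars.lowerChar pe = 'e') :
    aGo l (j+1) (some pe) true true true false = bAfterExp j l := by
  cases l with
  | nil => simp [aGo, bAfterExp, scanD]
  | cons c r =>
    by_cases hm : (c == '-') = true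
    · have hc : c = '-' := by simpa using hm
      subst hc
      have h1 : aGo ('-' :: r) (j+1) (some pe) true true true false
          = aGo r (j+2) (some '-') true true false false := by
        simp only [aGo]
        rw [if_pos (by simp)]
        simp
      rw [h1, expTail r (j+2) '-' minus_lower_ne_e]
      have hge := scanD_ge r (j+2)
      simp only [bAfterExp, hm]
      cases h2 : (scanD r (j+2)).2 with
      | nil => simp [h2]
      | cons x xs => simp [h2]; omega
    · by_cases hd : PySem.Chars.isdigit c = true
      · have h1 : aGo (c :: r) (j+1) (some pe) true true true false
            = aGo r (j+2) (some c) true true false false := by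
          simp only [aGo]
          rw [if_pos (by simp [digit_eq_isdigit, hd])]
          simp
        rw [h1, expTail r (j+2) c (isDD_lower_ne_e (by simp [isDD, hd]))]
        have hge := scanD_ge r (j+2)
        have h2 : scanD (c :: r) (j+1) = scanD r (j+2) := by simp [scanD, hd]
        simp only [bAfterExp, hm, if_false, Bool.false_eq_true, h2]
        cases h3 : (scanD r (j+2)).2 with
        | nil => simp
        | cons x xs =>
          have : (scanD r (j+2)).1 ≠ j+1 := by omega
          simp [this]
      · have h1 : aGo (c :: r) (j+1) (some pe) true true true false = ((j+1 : Nat) : Int) - 1 := by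
          simp only [aGo]
          rw [if_neg (by simp [digit_eq_isdigit, hd, hm]), if_neg (by simp), if_pos (by simp),
            if_neg (by simp [hpe])]
        have h2 : scanD (c :: r) (j+1) = (j+1, c :: r) := by simp [scanD, hd]
        rw [h1]
        simp only [bAfterExp, hm, if_false, Bool.false_eq_true, h2]
        simp
-- mantissa phase: found, no exponent yet, prev is not an 'e'
theorem mantPhase (l : List Char) (j : Nat) (prev : Char)
    (hp : PySem.Chars.lowerChar prev ≠ 'e') :
    aGo l j (some prev) true false false false = bTail j l := by
  induction l generalizing j prev with
  | nil => simp [aGo, bTail, scanDD]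
  | cons c r ih =>
    by_cases hdd : isDD c = true
    · have h1 : aGo (c :: r) j (some prev) true false false false
          = aGo r (j+1) (some c) true false false false := by
        simp only [aGo]
        rw [if_pos (by revert hdd; simp [isDD, digit_eq_isdigit])]
        simp
      have h2 : bTail j (c :: r) = bTail (j+1) r := by
        simp [bTail, scanDD, hdd]
      rw [h1, h2]
      exact ih (j+1) c (isDD_lower_ne_e hdd)
    · have hsc : scanDD (c :: r) j = (j, c :: r) := by simp [scanDD, hdd]
      by_cases he : (c == 'e' || c == 'E') = true
      · have h1 : aGo (c :: r) j (some prev) true false false false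
            = aGo r (j+1) (some c) true true true false := by
          simp only [aGo]
          rw [if_neg (by revert hdd; simp [isDD, digit_eq_isdigit]),
            if_pos (by simp [lower_e_iff, he])]
        rw [h1, expPhase r j c (by have h := lower_e_iff c; rw [he] at h; simpa using h.symm)]
        simp [bTail, hsc, he]
      · have h1 : aGo (c :: r) j (some prev) true false false false = (j : Int) := by
          simp only [aGo]
          rw [if_neg (by revert hdd; simp [isDD, digit_eq_isdigit]),
            if_neg (by simp [lower_e_iff, he]), if_pos (by simp), if_pos (by simp [hp])]
        rw [h1]
        simp only [bTail, hsc]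
        simp [he]

-- skip phase: nothing found yet
theorem skipPhase (l : List Char) (i : Nat) (prev : Option Char) (rfdi : Bool) :
    aGo l i prev false false false rfdi =
      (match bStart l i with
       | none => -1
       | some (s, suf) => if rfdi then (s : Int) else bTail s suf) := by
  induction l generalizing i prev with
  | nil => simp [aGo, bStart]
  | cons c r ih =>
    by_cases hdd : isDD c = true
    · have hb : bStart (c :: r) i = some (i, c :: r) := by simp [bStart, hdd]
      rw [hb]
      cases rfdi with
      | true =>
        have h1 : aGo (c :: r) i prev false false false true = (i : Int) := by
          simp only [aGo]
          rw [if_pos (by revert hdd; simp [isDD, digit_eq_isdigit])]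
          simp
        rw [h1]
        simp
      | false =>
        have h1 : aGo (c :: r) i prev false false false false
            = aGo r (i+1) (some c) true false false false := by
          simp only [aGo]
          rw [if_pos (by revert hdd; simp [isDD, digit_eq_isdigit])]
          simp
        rw [h1, mantPhase r (i+1) c (isDD_lower_ne_e hdd)]
        simp [bTail, scanDD, hdd]
    · have hb : bStart (c :: r) i = bStart r (i+1) := by simp [bStart, hdd]
      have h1 : aGo (c :: r) i prev false false false rfdi
          = aGo r (i+1) (some c) false false false rfdi := by
        simp only [aGo]
        rw [if_neg (by revert hdd; simp [isDD, digit_eq_isdigit]),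
          if_neg (by simp), if_neg (by simp)]
      rw [h1, hb]
      exact ih (i+1) (some c)

-- ===== VERDICT (by name: the statement is the Claim_ definition above) =====
theorem index_after_parameter_py_spec : Claim_equal_index_after_parameter_py := by
  intro name rfdi _
  unfold Spec_index_after_parameter_py index_after_parameter_py index_after_parameter_py_alt
  rw [skipPhase]
  cases h : bStart name.toList 0 with
  | none => rfl
  | some sv => cases sv; simp [bTail]
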